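-- pv_equiv track=rewrite | github.com/infokiller/i3-workspace-groups | i3wsgroups/i3_workspace_groups.py | get_lowest_free_local_numbers
-- ===== SOURCE A (Python) =====
-- from typing import Set, Dict, List, Optional
--
-- _MAX_WORKSPACES_PER_GROUP = 100
--
-- def get_lowest_free_local_numbers(num: int,
--                                   used_local_numbers: Set[int]) -> List[int]:
--     local_numbers = []
--     for local_number in range(1, _MAX_WORKSPACES_PER_GROUP):
--         if len(local_numbers) == num:
--             break
--         if local_number in used_local_numbers:
--             continue
--         local_numbers.append(local_number)
--     assert len(local_numbers) == num
--     return local_numbers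
-- ===== SOURCE B (Python) =====
-- _MAX_WORKSPACES_PER_GROUP = 100
--
-- def get_lowest_free_local_numbers(num, used_local_numbers):
--     result = sorted(set(range(1, _MAX_WORKSPACES_PER_GROUP)) - used_local_numbers)[:num]
--     assert len(result) == num
--     return result
-- ===== Notes on version B (the rewrite author's own statement) =====
-- stated objective: simpler
-- what changed: Replaces the guarded early-stopping scan with a set difference over the candidate range followed by sort-and-slice of the first num elements.
import Mathlib
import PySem

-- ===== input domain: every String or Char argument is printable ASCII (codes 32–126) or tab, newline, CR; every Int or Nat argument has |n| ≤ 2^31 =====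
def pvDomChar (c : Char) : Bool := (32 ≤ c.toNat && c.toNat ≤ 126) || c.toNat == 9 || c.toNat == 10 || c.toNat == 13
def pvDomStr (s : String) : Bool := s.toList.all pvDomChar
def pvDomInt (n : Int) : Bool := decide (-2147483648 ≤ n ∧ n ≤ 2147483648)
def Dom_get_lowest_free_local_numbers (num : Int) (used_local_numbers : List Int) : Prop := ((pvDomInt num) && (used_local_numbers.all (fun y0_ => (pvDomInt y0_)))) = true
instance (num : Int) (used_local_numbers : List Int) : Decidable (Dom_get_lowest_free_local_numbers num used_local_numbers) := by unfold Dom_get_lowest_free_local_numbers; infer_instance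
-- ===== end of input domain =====

-- B replaces A's guarded early-stopping scan by set-difference over the candidate range, then sort and slice; simpler, not faster.


-- ===== PORT A =====
-- the for-loop with its break/continue, state: the accumulated list
def pvLoopA (num : Int) (used : List Int) : List Int → List Int → List Int
  | acc, [] => acc
  | acc, x :: rest =>
    if (acc.length : Int) = num then acc
    else if used.contains x then pvLoopA num used acc rest
    else pvLoopA num used (acc ++ [x]) rest

def get_lowest_free_local_numbers (num : Int) (used_local_numbers : List Int) : List Int :=
  pvLoopA num used_local_numbers [] (PySem.List.pyRange 1 100 1)

-- ===== PORT B =====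
def get_lowest_free_local_numbers_alt (num : Int) (used_local_numbers : List Int) : List Int :=
  PySem.List.slice
    (PySem.List.sorted
      (PySem.Set.diff (PySem.Set.ofList (PySem.List.pyRange 1 100 1)) (PySem.Set.ofList used_local_numbers))
      (fun x => x) false)
    none (some num)

-- ===== PRECONDITION & SPEC =====
-- Pre_ excludes exactly the inputs where A's assert fails (AssertionError): num negative, or
-- num larger than the number of free numbers in 1..99.
def Pre_get_lowest_free_local_numbers (num : Int) (used_local_numbers : List Int) : Prop :=
  0 ≤ num ∧ num ≤ ((PySem.List.pyRange 1 100 1).filter (fun x => !used_local_numbers.contains x)).length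
instance (num : Int) (used_local_numbers : List Int) : Decidable (Pre_get_lowest_free_local_numbers num used_local_numbers) := by unfold Pre_get_lowest_free_local_numbers; infer_instance

def pvWitness_get_lowest_free_local_numbers : Int × List Int := (3, [1, 3])

def Spec_get_lowest_free_local_numbers (num : Int) (used_local_numbers : List Int) (out : List Int) : Prop := out = get_lowest_free_local_numbers_alt num used_local_numbers
instance (num : Int) (used_local_numbers : List Int) (out : List Int) : Decidable (Spec_get_lowest_free_local_numbers num used_local_numbers out) := by unfold Spec_get_lowest_free_local_numbers; infer_instance

-- ===== CLAIM (what is proved, stated in full; the proofs are below) =====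
def Claim_equal_get_lowest_free_local_numbers : Prop := ∀ (num : Int) (used_local_numbers : List Int), Dom_get_lowest_free_local_numbers num used_local_numbers → Pre_get_lowest_free_local_numbers num used_local_numbers → Spec_get_lowest_free_local_numbers num used_local_numbers (get_lowest_free_local_numbers num used_local_numbers)

-- ===== LEMMAS AND PROOFS =====

-- A's loop collects the first (num - len acc) free numbers of the remaining range.
theorem pvLoopA_eq_take (num : Int) (used : List Int) (l acc : List Int)
    (h : (acc.length : Int) ≤ num) :
    pvLoopA num used acc l = acc ++ (l.filter (fun x => !used.contains x)).take (num.toNat - acc.length) := by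
  induction l generalizing acc with
  | nil => simp [pvLoopA]
  | cons x rest ih =>
    by_cases hlen : (acc.length : Int) = num
    · have : num.toNat - acc.length = 0 := by omega
      simp [pvLoopA, hlen, this]
    · have hlt : (acc.length : Int) < num := lt_of_le_of_ne h hlen
      by_cases hc : x ∈ used
      · simp [pvLoopA, hlen, hc, ih acc h]
      · have h' : ((acc ++ [x]).length : Int) ≤ num := by simp; omega
        have hk : num.toNat - acc.length = (num.toNat - (acc.length + 1)) + 1 := by omega
        simp [pvLoopA, hlen, hc, ih (acc ++ [x]) h', hk, List.take_succ_cons]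

-- B's set difference is the order-preserving filter of the range.
theorem pvDiff_eq_filter (used : List Int) :
    PySem.Set.diff (PySem.Set.ofList (PySem.List.pyRange 1 100 1)) (PySem.Set.ofList used)
      = (PySem.List.pyRange 1 100 1).filter (fun x => !used.contains x) := by
  rw [PySem.Set.ofList_eq_self_of_nodup _ (PySem.List.nodup_pyRange_one 1 100)]
  unfold PySem.Set.diff
  apply List.filter_congr
  intro x _
  simp [PySem.Set.mem_ofList]

-- the filtered range is already sorted ascending
theorem pvFilter_pairwise (used : List Int) :
    ((PySem.List.pyRange 1 100 1).filter (fun x => !used.contains x)).Pairwise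
      (fun a b : Int => (fun x => x) a ≤ (fun x => x) b) := by
  have := (PySem.List.pairwise_lt_pyRange_one 1 100).filter (fun x => !used.contains x)
  exact this.imp (fun h => le_of_lt h)

theorem get_lowest_free_local_numbers_spec : Claim_equal_get_lowest_free_local_numbers := by
  intro num used _ hpre
  unfold Spec_get_lowest_free_local_numbers get_lowest_free_local_numbers get_lowest_free_local_numbers_alt
  obtain ⟨h0, hle⟩ := hpre
  rw [pvDiff_eq_filter, PySem.List.sorted_eq_self_of_pairwise _ _ (pvFilter_pairwise used),
      PySem.List.slice_to _ h0,
      pvLoopA_eq_take num used _ [] (by simpa using h0)]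
  simp
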